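-- pv_equiv track=rewrite | github.com/matixezor/propositional-calculus-check-satisfiability | main.py | bracket_needed
-- ===== SOURCE A (Python) =====
-- def bracket_needed(sentence):
--     bracket = False
--
--     for char in sentence:
--         if char.isalpha() and not bracket:
--             return True
--         elif char == '(':
--             bracket = True
--         elif char == ')':
--             bracket = False
--
--     return False
-- ===== SOURCE B (Python) =====
-- def bracket_needed(sentence):
--     # Collect the characters seen while not inside brackets, then test them once.
--     inside = False
--     outside = []
--     for char in sentence:
--         if char == '(':
--             inside = True
--         elif char == ')':
--             inside = False
--         elif not inside:
--             outside.append(char)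
--     return any(c.isalpha() for c in outside)
-- ===== Notes on version B (the rewrite author's own statement) =====
-- stated objective: alternative
-- what changed: B replaces A's early-return scan with a collect-then-test pass: it accumulates the characters seen outside brackets and decides with a single any(isalpha) test after the loop.
import Mathlib
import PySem

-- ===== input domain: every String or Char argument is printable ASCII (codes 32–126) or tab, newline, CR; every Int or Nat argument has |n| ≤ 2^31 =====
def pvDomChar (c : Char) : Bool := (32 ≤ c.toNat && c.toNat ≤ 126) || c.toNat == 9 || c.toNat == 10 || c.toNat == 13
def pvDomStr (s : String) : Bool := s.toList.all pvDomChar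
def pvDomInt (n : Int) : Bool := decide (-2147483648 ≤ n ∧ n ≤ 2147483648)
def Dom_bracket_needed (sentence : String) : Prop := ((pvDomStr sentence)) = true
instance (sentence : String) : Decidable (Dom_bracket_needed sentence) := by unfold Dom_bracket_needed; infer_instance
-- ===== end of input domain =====

-- B replaces A's early-return scan with a collect-then-test pass (same cost); return values proved equal.

-- ===== PORT A =====
-- A's loop with early return: recursion over the characters carrying the bracket flag.
def bracketLoopA : List Char → Bool → Bool
  | [], _ => false
  | c :: cs, bracket =>
    if PySem.Chars.isalpha c && !bracket then true
    else if c = '(' then bracketLoopA cs true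
    else if c = ')' then bracketLoopA cs false
    else bracketLoopA cs bracket

def bracket_needed (sentence : String) : Bool :=
  bracketLoopA sentence.toList false

-- ===== PORT B =====
-- B's single pass: fold accumulating (inside flag, characters seen outside brackets), then one any-test.
def collectOutside (cs : List Char) : Bool × List Char :=
  cs.foldl
    (fun st c =>
      if c = '(' then (true, st.2)
      else if c = ')' then (false, st.2)
      else if st.1 then st
      else (st.1, st.2 ++ [c]))
    (false, [])

def bracket_needed_alt (sentence : String) : Bool :=
  ((collectOutside sentence.toList).2).any PySem.Chars.isalpha

-- ===== PRECONDITION & SPEC =====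
def Spec_bracket_needed (sentence : String) (out : Bool) : Prop := out = bracket_needed_alt sentence
instance (sentence : String) (out : Bool) : Decidable (Spec_bracket_needed sentence out) := by unfold Spec_bracket_needed; infer_instance

-- ===== CLAIM (what is proved, stated in full; the proofs are below) =====
def Claim_equal_bracket_needed : Prop := ∀ (sentence : String), Dom_bracket_needed sentence → Spec_bracket_needed sentence (bracket_needed sentence)

-- ===== LEMMAS AND PROOFS =====

-- Invariant: the any-test over the fold from state (b, acc) equals acc.any || A's loop from flag b.
theorem collect_loop (cs : List Char) : ∀ (b : Bool) (acc : List Char),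
    ((cs.foldl
      (fun st c =>
        if c = '(' then (true, st.2)
        else if c = ')' then (false, st.2)
        else if st.1 then st
        else (st.1, st.2 ++ [c]))
      (b, acc)).2).any PySem.Chars.isalpha
    = (acc.any PySem.Chars.isalpha || bracketLoopA cs b) := by
  induction cs with
  | nil => intro b acc; simp [bracketLoopA]
  | cons c cs ih =>
    intro b acc
    by_cases hl : c = '('
    · subst hl
      simp only [List.foldl_cons, if_pos rfl, bracketLoopA, ih]
      have h : PySem.Chars.isalpha '(' = false := by decide
      simp [h]
    · by_cases hr : c = ')'
      · subst hr
        simp only [List.foldl_cons, if_neg (show ¬ (')' = '(') by decide), if_pos rfl,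
          bracketLoopA, ih]
        have h : PySem.Chars.isalpha ')' = false := by decide
        simp [h]
      · cases b with
        | true =>
          simp only [List.foldl_cons, if_neg hl, if_neg hr, bracketLoopA, ih]
          simp
        | false =>
          simp only [List.foldl_cons, if_neg hl, if_neg hr, bracketLoopA, ih]
          by_cases ha : PySem.Chars.isalpha c = true
          · simp [ha, List.any_append]
          · simp [ha, List.any_append]

-- ===== VERDICT (by name: the statement is the Claim_ definition above) =====
theorem bracket_needed_spec : Claim_equal_bracket_needed := by
  intro s _
  unfold Spec_bracket_needed bracket_needed bracket_needed_alt collectOutside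
  rw [collect_loop]
  simp
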